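-- pv_equiv track=rewrite | github.com/caregor/EntPy_HW_6 | task1_2/chess.py | is_valid_queens
-- ===== SOURCE A (Python) =====
-- def is_valid_queens(arrangement):
--     def is_diagonal(x1, y1, x2, y2):
--         return abs(x1 - x2) == abs(y1 - y2)
--
--     for i in range(8):
--         for j in range(i + 1, 8):
--             x1, y1 = arrangement[i]
--             x2, y2 = arrangement[j]
--             if x1 == x2 or y1 == y2 or is_diagonal(x1, y1, x2, y2):
--                 return False
--     return True
-- ===== SOURCE B (Python) =====
-- def is_valid_queens(arrangement):
--     rows, cols, sums, diffs = set(), set(), set(), set()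
--     for i in range(8):
--         x, y = arrangement[i]
--         if x in rows or y in cols or (x + y) in sums or (x - y) in diffs:
--             return False
--         rows.add(x)
--         cols.add(y)
--         sums.add(x + y)
--         diffs.add(x - y)
--     return True
-- ===== Notes on version B (the rewrite author's own statement) =====
-- stated objective: idiomatic
-- what changed: Replaced the nested pairwise double loop (28 pair checks with abs-diagonal tests) by a single pass over the 8 indices maintaining four 'seen' sets (rows, columns, x+y anti-diagonals, x-y main diagonals), returning False on the first collision.
import Mathlib
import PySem

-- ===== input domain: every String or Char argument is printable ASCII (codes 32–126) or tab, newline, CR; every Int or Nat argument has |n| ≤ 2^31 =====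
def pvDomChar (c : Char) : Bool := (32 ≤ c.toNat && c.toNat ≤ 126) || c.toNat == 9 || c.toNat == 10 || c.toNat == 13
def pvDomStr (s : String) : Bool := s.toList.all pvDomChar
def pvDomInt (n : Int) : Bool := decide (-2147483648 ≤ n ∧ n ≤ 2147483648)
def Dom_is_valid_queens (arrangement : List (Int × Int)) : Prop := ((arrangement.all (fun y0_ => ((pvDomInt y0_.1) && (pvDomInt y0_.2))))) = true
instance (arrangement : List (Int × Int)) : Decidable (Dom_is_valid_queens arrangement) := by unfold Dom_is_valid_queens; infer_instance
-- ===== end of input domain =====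

-- B replaces A's 28-pair nested loop by one pass over the 8 indices with four 'seen' sets
-- (rows, cols, x+y, x-y), returning False at the first collision (idiomatic single-pass check).

-- ===== PORT A =====
def is_diagonal (x1 y1 x2 y2 : Int) : Bool := (x1 - x2).natAbs == (y1 - y2).natAbs

-- loop body of A for the pair (i, j); on a missing index Python raises IndexError
-- (excluded by Pre_); the port continues with 'true' there.
def pairOK (arrangement : List (Int × Int)) (i j : Int) : Bool :=
  match PySem.List.pyGet? arrangement i, PySem.List.pyGet? arrangement j with
  | some (x1, y1), some (x2, y2) => !(x1 == x2 || y1 == y2 || is_diagonal x1 y1 x2 y2)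
  | _, _ => true

def is_valid_queens (arrangement : List (Int × Int)) : Bool :=
  (PySem.List.pyRange 0 8 1).all fun i =>
    (PySem.List.pyRange (i + 1) 8 1).all fun j => pairOK arrangement i j

-- ===== PORT B =====
-- one pass; on a missing index Python raises IndexError (excluded by Pre_), the port stops with 'false'.
def queensScan (arrangement : List (Int × Int)) (rows cols sums diffs : PySem.Set Int) :
    List Int → Bool
  | [] => true
  | i :: rest =>
    match PySem.List.pyGet? arrangement i with
    | none => false
    | some (x, y) =>
      if rows.contains x || cols.contains y || sums.contains (x + y) || diffs.contains (x - y) then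
        false
      else
        queensScan arrangement (PySem.Set.add rows x) (PySem.Set.add cols y)
          (PySem.Set.add sums (x + y)) (PySem.Set.add diffs (x - y)) rest

def is_valid_queens_alt (arrangement : List (Int × Int)) : Bool :=
  queensScan arrangement PySem.Set.empty PySem.Set.empty PySem.Set.empty PySem.Set.empty
    (PySem.List.pyRange 0 8 1)

-- ===== PRECONDITION & SPEC =====
-- Pre_ excludes exactly the inputs on which the Python A raises IndexError: lists shorter than 8
-- whose head attacks no later element (A then reaches arrangement[len] before returning False).
def Pre_is_valid_queens (arrangement : List (Int × Int)) : Prop :=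
  8 ≤ arrangement.length ∨
    (arrangement.head?.any fun p => arrangement.tail.any fun q =>
      p.1 == q.1 || p.2 == q.2 || (p.1 - q.1).natAbs == (p.2 - q.2).natAbs) = true
instance (arrangement : List (Int × Int)) : Decidable (Pre_is_valid_queens arrangement) := by
  unfold Pre_is_valid_queens; infer_instance

def pvWitness_is_valid_queens : (List (Int × Int)) :=
  [(0, 0), (1, 2), (2, 4), (3, 6), (4, 1), (5, 3), (6, 5), (7, 7)]

def Spec_is_valid_queens (arrangement : List (Int × Int)) (out : Bool) : Prop := out = is_valid_queens_alt arrangement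
instance (arrangement : List (Int × Int)) (out : Bool) : Decidable (Spec_is_valid_queens arrangement out) := by unfold Spec_is_valid_queens; infer_instance

-- ===== CLAIM (what is proved, stated in full; the proofs are below) =====
def Claim_equal_is_valid_queens : Prop := ∀ (arrangement : List (Int × Int)), Dom_is_valid_queens arrangement → Pre_is_valid_queens arrangement → Spec_is_valid_queens arrangement (is_valid_queens arrangement)

-- ===== LEMMAS AND PROOFS =====

-- the attacking relation, in the linear form B's four sets test
def attackP (p q : Int × Int) : Prop :=
  p.1 = q.1 ∨ p.2 = q.2 ∨ p.1 + p.2 = q.1 + q.2 ∨ p.1 - p.2 = q.1 - q.2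

lemma attackP_mk (x1 y1 x2 y2 : Int) :
    attackP (x1, y1) (x2, y2) ↔
      (x1 = x2 ∨ y1 = y2 ∨ x1 + y1 = x2 + y2 ∨ x1 - y1 = x2 - y2) := Iff.rfl

lemma pairOK_iff (arr : List (Int × Int)) (i j : Int) :
    pairOK arr i j = true ↔
      ∀ p q, PySem.List.pyGet? arr i = some p → PySem.List.pyGet? arr j = some q →
        ¬ attackP p q := by
  cases h1 : PySem.List.pyGet? arr i with
  | none => simp [pairOK, h1]
  | some p =>
    cases h2 : PySem.List.pyGet? arr j with
    | none => simp [pairOK, h1, h2]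
    | some q =>
      obtain ⟨x1, y1⟩ := p; obtain ⟨x2, y2⟩ := q
      simp only [pairOK, h1, h2, is_diagonal, Option.some.injEq, Bool.not_eq_true',
        Bool.or_eq_false_iff, beq_eq_false_iff_ne, ne_eq]
      constructor
      · intro h p' q' hp hq
        subst hp; subst hq
        rw [attackP_mk]
        omega
      · intro h
        have h' := h (x1, y1) (x2, y2) rfl rfl
        rw [attackP_mk] at h'
        omega

lemma A_true_iff (arr : List (Int × Int)) :
    is_valid_queens arr = true ↔
      ∀ i j : Int, 0 ≤ i → i < j → j < 8 →
        ∀ p q, PySem.List.pyGet? arr i = some p → PySem.List.pyGet? arr j = some q →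
          ¬ attackP p q := by
  simp only [is_valid_queens, List.all_eq_true, PySem.List.mem_pyRange_one, pairOK_iff]
  constructor
  · intro h i j h0 hij hj8 p q hp hq
    exact h i ⟨h0, by omega⟩ j ⟨by omega, hj8⟩ p q hp hq
  · intro h i hi j hj p q hp hq
    exact h i j hi.1 (by omega) hj.2 p q hp hq

-- invariant of B's scan: the four sets hold exactly the coordinates of the already-processed
-- indices [0, k), and the scan from k succeeds iff every remaining index fetches and no
-- remaining element attacks any earlier one.
lemma queensScan_iff (arr : List (Int × Int)) :
    ∀ (n : Nat), n ≤ 8 → ∀ (rows cols sums diffs : PySem.Set Int),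
      (∀ z : Int, rows.contains z = true ↔
        ∃ i : Int, 0 ≤ i ∧ i < 8 - (n : Int) ∧
          ∃ p, PySem.List.pyGet? arr i = some p ∧ p.1 = z) →
      (∀ z : Int, cols.contains z = true ↔
        ∃ i : Int, 0 ≤ i ∧ i < 8 - (n : Int) ∧
          ∃ p, PySem.List.pyGet? arr i = some p ∧ p.2 = z) →
      (∀ z : Int, sums.contains z = true ↔
        ∃ i : Int, 0 ≤ i ∧ i < 8 - (n : Int) ∧
          ∃ p, PySem.List.pyGet? arr i = some p ∧ p.1 + p.2 = z) →
      (∀ z : Int, diffs.contains z = true ↔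
        ∃ i : Int, 0 ≤ i ∧ i < 8 - (n : Int) ∧
          ∃ p, PySem.List.pyGet? arr i = some p ∧ p.1 - p.2 = z) →
      (queensScan arr rows cols sums diffs (PySem.List.pyRange (8 - (n : Int)) 8 1) = true ↔
        ((∀ j : Int, 8 - (n : Int) ≤ j → j < 8 → ∃ q, PySem.List.pyGet? arr j = some q) ∧
         (∀ j : Int, 8 - (n : Int) ≤ j → j < 8 → ∀ i : Int, 0 ≤ i → i < j →
           ∀ p q, PySem.List.pyGet? arr i = some p → PySem.List.pyGet? arr j = some q →
             ¬ attackP p q))) := by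
  intro n
  induction n with
  | zero =>
    intro _ rows cols sums diffs _ _ _ _
    rw [PySem.List.pyRange_one_eq_nil (by omega)]
    simp only [queensScan, true_iff]
    constructor
    · intro j hj hj8; omega
    · intro j hj hj8; omega
  | succ m ih =>
    intro hn rows cols sums diffs hr hc hs hd
    simp only [Nat.cast_add, Nat.cast_one] at hr hc hs hd ⊢
    obtain ⟨k, hk⟩ : ∃ k : Int, 8 - ((m : Int) + 1) = k := ⟨_, rfl⟩
    rw [hk] at hr hc hs hd ⊢
    have ih' := ih (by omega)
    rw [show (8 : Int) - (m : Int) = k + 1 by omega] at ih'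
    have hk8 : k < 8 := by omega
    rw [PySem.List.pyRange_one_cons hk8]
    cases hget : PySem.List.pyGet? arr k with
    | none =>
      simp only [queensScan, hget]
      constructor
      · intro h; exact absurd h (by simp)
      · rintro ⟨h1, _⟩
        obtain ⟨q, hq⟩ := h1 k (by omega) (by omega)
        rw [hget] at hq; exact absurd hq (by simp)
    | some xy =>
      obtain ⟨x, y⟩ := xy
      by_cases hcol : (rows.contains x || cols.contains y || sums.contains (x + y)
          || diffs.contains (x - y)) = true
      · -- collision: both sides false
        simp only [queensScan, hget, hcol, if_true]
        constructor
        · intro h; exact absurd h (by simp)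
        · rintro ⟨_, h2⟩
          -- the collision yields an earlier element attacking (x, y)
          have : ∃ i : Int, 0 ≤ i ∧ i < k ∧
              ∃ p, PySem.List.pyGet? arr i = some p ∧ attackP p (x, y) := by
            simp only [Bool.or_eq_true] at hcol
            rcases hcol with ((h' | h') | h') | h'
            · obtain ⟨i, h0, hik, p, hp, he⟩ := (hr x).mp h'
              exact ⟨i, h0, by omega, p, hp, Or.inl he⟩
            · obtain ⟨i, h0, hik, p, hp, he⟩ := (hc y).mp h'
              exact ⟨i, h0, by omega, p, hp, Or.inr (Or.inl he)⟩
            · obtain ⟨i, h0, hik, p, hp, he⟩ := (hs (x + y)).mp h'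
              exact ⟨i, h0, by omega, p, hp, Or.inr (Or.inr (Or.inl he))⟩
            · obtain ⟨i, h0, hik, p, hp, he⟩ := (hd (x - y)).mp h'
              exact ⟨i, h0, by omega, p, hp, Or.inr (Or.inr (Or.inr he))⟩
          obtain ⟨i, h0, hik, p, hp, hatt⟩ := this
          exact absurd hatt (h2 k (by omega) (by omega) i h0 (by omega) p (x, y) hp hget)
      · -- no collision: step and use the induction hypothesis at k + 1
        simp only [queensScan, hget, hcol, Bool.false_eq_true, if_false]
        have hnew : ∀ (f : Int × Int → Int) (s : PySem.Set Int) (v : Int),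
            (∀ z : Int, s.contains z = true ↔
              ∃ i : Int, 0 ≤ i ∧ i < k ∧
                ∃ p, PySem.List.pyGet? arr i = some p ∧ f p = z) →
            f (x, y) = v →
            ∀ z : Int, (PySem.Set.add s v).contains z = true ↔
              ∃ i : Int, 0 ≤ i ∧ i < k + 1 ∧
                ∃ p, PySem.List.pyGet? arr i = some p ∧ f p = z := by
          intro f s v hinv hv z
          have hmem : (PySem.Set.add s v).contains z = true ↔
              (s.contains z = true ∨ z = v) := by
            rw [PySem.Set.contains_iff, PySem.Set.mem_add, PySem.Set.contains_iff]
          rw [hmem, hinv]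
          constructor
          · rintro (⟨i, h0, hik, p, hp, he⟩ | rfl)
            · exact ⟨i, h0, by omega, p, hp, he⟩
            · exact ⟨k, by omega, by omega, (x, y), hget, hv⟩
          · rintro ⟨i, h0, hik, p, hp, he⟩
            by_cases hik' : i < k
            · exact Or.inl ⟨i, h0, hik', p, hp, he⟩
            · have : i = k := by omega
              subst this
              rw [hget] at hp; injection hp with hp; subst hp
              exact Or.inr (by rw [← he, hv])
        have step := ih'
          (PySem.Set.add rows x) (PySem.Set.add cols y)
          (PySem.Set.add sums (x + y)) (PySem.Set.add diffs (x - y))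
          (hnew (fun p => p.1) rows x hr rfl)
          (hnew (fun p => p.2) cols y hc rfl)
          (hnew (fun p => p.1 + p.2) sums (x + y) hs rfl)
          (hnew (fun p => p.1 - p.2) diffs (x - y) hd rfl)
        rw [step]
        have hnocol : ∀ i : Int, 0 ≤ i → i < k →
            ∀ p, PySem.List.pyGet? arr i = some p → ¬ attackP p (x, y) := by
          intro i h0 hik p hp hatt
          apply hcol
          simp only [Bool.or_eq_true]
          rcases hatt with h' | h' | h' | h'
          · exact Or.inl (Or.inl (Or.inl ((hr x).mpr ⟨i, h0, by omega, p, hp, h'⟩)))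
          · exact Or.inl (Or.inl (Or.inr ((hc y).mpr ⟨i, h0, by omega, p, hp, h'⟩)))
          · exact Or.inl (Or.inr ((hs (x + y)).mpr ⟨i, h0, by omega, p, hp, h'⟩))
          · exact Or.inr ((hd (x - y)).mpr ⟨i, h0, by omega, p, hp, h'⟩)
        constructor
        · rintro ⟨h1, h2⟩
          refine ⟨?_, ?_⟩
          · intro j hj hj8
            by_cases hjk : j = k
            · subst hjk; exact ⟨(x, y), hget⟩
            · exact h1 j (by omega) hj8
          · intro j hj hj8 i h0 hij p q hp hq
            by_cases hjk : j = k
            · subst hjk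
              rw [hget] at hq; injection hq with hq; subst hq
              exact hnocol i h0 hij p hp
            · exact h2 j (by omega) hj8 i h0 hij p q hp hq
        · rintro ⟨h1, h2⟩
          refine ⟨?_, ?_⟩
          · intro j hj hj8; exact h1 j (by omega) hj8
          · intro j hj hj8 i h0 hij p q hp hq
            exact h2 j (by omega) hj8 i h0 hij p q hp hq

lemma B_true_iff (arr : List (Int × Int)) :
    is_valid_queens_alt arr = true ↔
      ((∀ j : Int, 0 ≤ j → j < 8 → ∃ q, PySem.List.pyGet? arr j = some q) ∧
       (∀ j : Int, 0 ≤ j → j < 8 → ∀ i : Int, 0 ≤ i → i < j →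
         ∀ p q, PySem.List.pyGet? arr i = some p → PySem.List.pyGet? arr j = some q →
           ¬ attackP p q)) := by
  have h := queensScan_iff arr 8 (le_refl 8)
    PySem.Set.empty PySem.Set.empty PySem.Set.empty PySem.Set.empty
    (by intro z
        constructor
        · intro h; exact absurd h (by simp [PySem.Set.empty])
        · rintro ⟨i, h0, hi, -⟩; omega)
    (by intro z
        constructor
        · intro h; exact absurd h (by simp [PySem.Set.empty])
        · rintro ⟨i, h0, hi, -⟩; omega)
    (by intro z
        constructor
        · intro h; exact absurd h (by simp [PySem.Set.empty])
        · rintro ⟨i, h0, hi, -⟩; omega)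
    (by intro z
        constructor
        · intro h; exact absurd h (by simp [PySem.Set.empty])
        · rintro ⟨i, h0, hi, -⟩; omega)
  rw [show ((8 : Nat) : Int) = (8 : Int) from rfl, sub_self] at h
  rw [is_valid_queens_alt]
  exact h

lemma fetch_all_of_len (arr : List (Int × Int)) (hlen : 8 ≤ arr.length) :
    ∀ j : Int, 0 ≤ j → j < 8 → ∃ q, PySem.List.pyGet? arr j = some q := by
  intro j h0 h8
  have hj : j.toNat < arr.length := by omega
  rw [show j = (j.toNat : Int) by omega, PySem.List.pyGet?_natCast]
  exact ⟨arr[j.toNat], List.getElem?_eq_getElem hj⟩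

-- ===== VERDICT (by name: the statement is the Claim_ definition above) =====
theorem is_valid_queens_spec : Claim_equal_is_valid_queens := by
  intro arr _ hpre
  unfold Spec_is_valid_queens
  rw [Bool.eq_iff_iff, A_true_iff, B_true_iff]
  by_cases hlen : 8 ≤ arr.length
  · -- every index fetches: the two pair conditions coincide
    constructor
    · intro h
      exact ⟨fetch_all_of_len arr hlen,
        fun j h0 h8 i hi0 hij p q hp hq => h i j hi0 hij h8 p q hp hq⟩
    · rintro ⟨_, h2⟩ i j hi0 hij hj8 p q hp hq
      exact h2 j (by omega) hj8 i hi0 hij p q hp hq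
  · -- short list: Pre_ gives a later element attacked by the head; both sides are false
    have hshort : arr.length < 8 := by omega
    rcases hpre with h | h
    · omega
    cases harr : arr with
    | nil => rw [harr] at h; simp at h
    | cons p t =>
      subst harr
      simp only [List.head?_cons, List.tail_cons, Option.any_some, List.any_eq_true] at h
      have hlc : (p :: t).length = t.length + 1 := rfl
      obtain ⟨q, hq, hatt⟩ := h
      obtain ⟨m, hm, rfl⟩ := List.mem_iff_getElem.mp hq
      constructor
      · intro hA
        exfalso
        have hgp : PySem.List.pyGet? (p :: t) (0 : Int) = some p :=
          PySem.List.pyGet?_zero_cons p t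
        have hgq : PySem.List.pyGet? (p :: t) ((((m + 1 : Nat)) : Int)) = some t[m] := by
          rw [PySem.List.pyGet?_natCast, List.getElem?_cons_succ, List.getElem?_eq_getElem hm]
        have := hA 0 (((m + 1 : Nat) : Int)) (by omega) (by omega)
          (by omega) p t[m] hgp hgq
        apply this
        simp only [Bool.or_eq_true, beq_iff_eq] at hatt
        unfold attackP
        rcases hatt with (h' | h') | h'
        · exact Or.inl h'
        · exact Or.inr (Or.inl h')
        · omega
      · rintro ⟨h1, _⟩
        exfalso
        obtain ⟨q', hq'⟩ := h1 ((p :: t).length : Int) (by omega) (by omega)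
        rw [PySem.List.pyGet?_natCast] at hq'
        simp at hq'
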